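-- pv_equiv track=rewrite | github.com/ivannikov-lab/style-change-analysis | models/utils/text_segmentation.py | get_start_indices
-- ===== SOURCE A (Python) =====
-- def get_start_indices(style_change_indices, paragraphs):
--     indices = style_change_indices
--     breaches = []
--     if len(indices):
--         text = []
--         length = 0
--         for i in range(len(indices) - 1):
--             text.append('\n'.join([*paragraphs[indices[i]:indices[i + 1]], '']))
--             length += len(text[-1])
--             breaches.append(length)
--     return breaches
-- ===== SOURCE B (Python) =====
-- def get_start_indices(style_change_indices, paragraphs):
--     prefix = [0]
--     for p in paragraphs:
--         prefix.append(prefix[-1] + len(p))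
--     n = len(paragraphs)
--     breaches = []
--     total = 0
--     for a, b in zip(style_change_indices, style_change_indices[1:]):
--         start, stop, _ = slice(a, b).indices(n)
--         if start < stop:
--             total += prefix[stop] - prefix[start] + (stop - start)
--         breaches.append(total)
--     return breaches
-- ===== Notes on version B (the rewrite author's own statement) =====
-- stated objective: faster
-- what changed: B builds prefix sums of paragraph lengths once and computes each cumulative breach as prefix[stop]-prefix[start]+(stop-start) over zipped consecutive index pairs (bounds normalized with the stdlib's slice(a,b).indices(n)), with no string construction.
import Mathlib
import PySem

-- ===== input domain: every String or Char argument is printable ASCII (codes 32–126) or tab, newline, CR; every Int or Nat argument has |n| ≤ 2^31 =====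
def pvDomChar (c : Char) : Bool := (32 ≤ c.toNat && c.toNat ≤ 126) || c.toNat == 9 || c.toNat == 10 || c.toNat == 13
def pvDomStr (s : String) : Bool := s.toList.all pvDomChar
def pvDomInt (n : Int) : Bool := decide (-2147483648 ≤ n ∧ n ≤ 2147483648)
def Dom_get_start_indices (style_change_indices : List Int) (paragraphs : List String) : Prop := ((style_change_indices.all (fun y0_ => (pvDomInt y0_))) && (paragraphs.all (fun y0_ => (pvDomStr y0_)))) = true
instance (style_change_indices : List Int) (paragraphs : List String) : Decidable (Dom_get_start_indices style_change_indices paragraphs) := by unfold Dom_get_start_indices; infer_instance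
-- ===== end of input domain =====

-- B replaces A's building of each joined segment string with prefix sums of paragraph
-- lengths (segment length = length-sum + paragraph count), normalizing slice bounds with
-- the stdlib's slice(a, b).indices(n); objective: faster.

-- ===== PORT A =====
-- loop body: text.append('\n'.join([*paragraphs[indices[i]:indices[i+1]], ''])); length += len(text[-1]); breaches.append(length)
def get_start_indices (style_change_indices : List Int) (paragraphs : List String) : List Int :=
  let indices := style_change_indices
  if indices.length ≠ 0 then
    (((PySem.List.pyRange 0 ((indices.length : Int) - 1) 1).foldl
      (fun (st : List String × Int × List Int) i =>
        let seg := PySem.Str.join "\n"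
          (PySem.List.slice paragraphs (some (PySem.List.pyGetD indices i 0))
            (some (PySem.List.pyGetD indices (i + 1) 0)) ++ [""])
        let text := st.1 ++ [seg]
        let length := st.2.1 + PySem.Str.len (PySem.List.pyGetD text (-1) "")
        (text, length, st.2.2 ++ [length]))
      ([], 0, [])).2.2)
  else []

-- ===== PORT B =====
-- exact port of Python's slice(a, b).indices(n) for the default step 1 (the two
-- normalized bounds; the returned step is the constant 1 and is unused in Source B)
def pySliceIndices1 (a b : Int) (n : Nat) : Int × Int :=
  ((PySem.List.clampIdx n a : Int), (PySem.List.clampIdx n b : Int))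

def get_start_indices_alt (style_change_indices : List Int) (paragraphs : List String) : List Int :=
  let prefix_ : List Int := paragraphs.foldl
    (fun acc p => acc ++ [PySem.List.pyGetD acc (-1) 0 + PySem.Str.len p]) [(0 : Int)]
  let n : Nat := paragraphs.length
  ((style_change_indices.zip (PySem.List.slice style_change_indices (some 1) none)).foldl
    (fun (st : Int × List Int) ab =>
      let ss := pySliceIndices1 ab.1 ab.2 n
      let total := if ss.1 < ss.2
        then st.1 + (PySem.List.pyGetD prefix_ ss.2 0 - PySem.List.pyGetD prefix_ ss.1 0
          + (ss.2 - ss.1))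
        else st.1
      (total, st.2 ++ [total]))
    (0, [])).2

-- ===== PRECONDITION & SPEC =====
def Spec_get_start_indices (style_change_indices : List Int) (paragraphs : List String) (out : List Int) : Prop := out = get_start_indices_alt style_change_indices paragraphs
instance (style_change_indices : List Int) (paragraphs : List String) (out : List Int) : Decidable (Spec_get_start_indices style_change_indices paragraphs out) := by unfold Spec_get_start_indices; infer_instance

-- ===== CLAIM =====
def Claim_equal_get_start_indices : Prop := ∀ (style_change_indices : List Int) (paragraphs : List String), Dom_get_start_indices style_change_indices paragraphs → Spec_get_start_indices style_change_indices paragraphs (get_start_indices style_change_indices paragraphs)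

-- ===== LEMMAS AND PROOFS =====

-- length of '\n'.join(parts + ['']) in characters = sum of part lengths + number of parts
theorem pv_join_len (l : List (List Char)) :
    (PySem.Chars.join ['\n'] (l ++ [([] : List Char)])).length
      = (l.map List.length).sum + l.length := by
  induction l with
  | nil => simp [PySem.Chars.join_singleton]
  | cons x t ih =>
    rw [List.cons_append]
    rcases ht : t ++ [([] : List Char)] with _ | ⟨q, rest⟩
    · exact absurd ht (by simp)
    · rw [PySem.Chars.join_cons_cons, ← ht]
      simp only [List.length_append, List.map_cons, List.sum_cons, List.length_cons, ih]
      simp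
      omega

-- the prefix-sum list B builds, unfolded to a scanl
theorem pv_prefix_build (l : List String) (init : List Int) (a : Int) :
    l.foldl (fun acc p => acc ++ [PySem.List.pyGetD acc (-1) 0 + PySem.Str.len p]) (init ++ [a])
      = init ++ (List.scanl (fun s p => s + PySem.Str.len p) a l) := by
  induction l generalizing init a with
  | nil => simp
  | cons p t ih =>
    simp only [List.foldl_cons]
    rw [PySem.List.pyGetD_neg_one_append_singleton]
    have : init ++ [a] ++ [a + PySem.Str.len p] = (init ++ [a]) ++ [a + PySem.Str.len p] := by simp
    rw [this, ih (init ++ [a])]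
    simp

theorem pv_scanl_get (l : List String) (a : Int) (k : Nat) (hk : k ≤ l.length) :
    (List.scanl (fun s p => s + PySem.Str.len p) a l).getD k 0
      = a + (((l.take k).map PySem.Str.len).sum) := by
  induction l generalizing a k with
  | nil =>
    simp only [List.length_nil, Nat.le_zero] at hk
    subst hk; simp
  | cons p t ih =>
    cases k with
    | zero => simp
    | succ m =>
      simp only [List.scanl_cons, List.getD_cons_succ, List.take_succ_cons, List.map_cons,
        List.sum_cons]
      rw [ih (a + PySem.Str.len p) m (by simpa using hk)]
      ring

-- B's prefix list read at 0 ≤ c ≤ n gives the sum of the first c paragraph lengths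
theorem pv_prefix_get (paragraphs : List String) (c : Int) (h0 : 0 ≤ c)
    (hc : c ≤ (paragraphs.length : Int)) :
    PySem.List.pyGetD
      (paragraphs.foldl (fun acc p => acc ++ [PySem.List.pyGetD acc (-1) 0 + PySem.Str.len p])
        [(0 : Int)]) c 0
      = (((paragraphs.take c.toNat).map PySem.Str.len).sum) := by
  have h := pv_prefix_build paragraphs [] 0
  simp only [List.nil_append] at h
  rw [h]
  obtain ⟨k, rfl⟩ : ∃ k : Nat, c = (k : Int) := ⟨c.toNat, by omega⟩
  rw [PySem.List.pyGetD_natCast]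
  rw [pv_scanl_get paragraphs 0 k (by exact_mod_cast hc)]
  simp

-- per-pair agreement: A's joined-segment length equals B's prefix-sum increment
theorem pv_seg_len (paragraphs : List String) (a b : Int) :
    PySem.Str.len (PySem.Str.join "\n"
        (PySem.List.slice paragraphs (some a) (some b) ++ [""]))
      = (if (pySliceIndices1 a b paragraphs.length).1 < (pySliceIndices1 a b paragraphs.length).2
          then PySem.List.pyGetD
              (paragraphs.foldl (fun acc p => acc ++ [PySem.List.pyGetD acc (-1) 0 + PySem.Str.len p])
                [(0 : Int)]) (pySliceIndices1 a b paragraphs.length).2 0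
            - PySem.List.pyGetD
              (paragraphs.foldl (fun acc p => acc ++ [PySem.List.pyGetD acc (-1) 0 + PySem.Str.len p])
                [(0 : Int)]) (pySliceIndices1 a b paragraphs.length).1 0
            + ((pySliceIndices1 a b paragraphs.length).2 - (pySliceIndices1 a b paragraphs.length).1)
          else 0) := by
  unfold pySliceIndices1
  simp only
  have hcan : PySem.List.clampIdx paragraphs.length a ≤ paragraphs.length :=
    PySem.List.clampIdx_le paragraphs.length a
  have hcbn : PySem.List.clampIdx paragraphs.length b ≤ paragraphs.length :=
    PySem.List.clampIdx_le paragraphs.length b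
  have hslice : PySem.List.slice paragraphs (some a) (some b)
      = (paragraphs.drop (PySem.List.clampIdx paragraphs.length a)).take
          (PySem.List.clampIdx paragraphs.length b - PySem.List.clampIdx paragraphs.length a) := rfl
  have hlen : PySem.Str.len (PySem.Str.join "\n"
      (PySem.List.slice paragraphs (some a) (some b) ++ [""]))
      = (((PySem.List.slice paragraphs (some a) (some b)).map PySem.Str.len).sum)
        + ((PySem.List.slice paragraphs (some a) (some b)).length : Int) := by
    rw [PySem.Str.len_eq, PySem.Str.toList_join]
    have hmap : (PySem.List.slice paragraphs (some a) (some b) ++ [""]).map String.toList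
        = (PySem.List.slice paragraphs (some a) (some b)).map String.toList ++ [([] : List Char)] := by
      simp
    rw [hmap]
    have hs : ("\n" : String).toList = ['\n'] := rfl
    rw [hs, pv_join_len]
    have hfun : PySem.Str.len = (fun x : String => (x.length : Int)) :=
      funext fun x => by rw [PySem.Str.len_eq]; simp
    rw [hfun]
    push_cast
    simp only [List.map_map, Function.comp_def, List.length_map]
    simp
  rw [hlen]
  split_ifs with h
  · have hlt : PySem.List.clampIdx paragraphs.length a < PySem.List.clampIdx paragraphs.length b := by
      omega
    rw [pv_prefix_get paragraphs ((PySem.List.clampIdx paragraphs.length b : Nat) : Int)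
      (Int.natCast_nonneg _) (by exact_mod_cast hcbn)]
    rw [pv_prefix_get paragraphs ((PySem.List.clampIdx paragraphs.length a : Nat) : Int)
      (Int.natCast_nonneg _) (by exact_mod_cast hcan)]
    simp only [Int.toNat_natCast]
    have hsplit : paragraphs.take (PySem.List.clampIdx paragraphs.length b)
        = paragraphs.take (PySem.List.clampIdx paragraphs.length a)
          ++ (paragraphs.drop (PySem.List.clampIdx paragraphs.length a)).take
              (PySem.List.clampIdx paragraphs.length b - PySem.List.clampIdx paragraphs.length a) := by
      conv_lhs => rw [show PySem.List.clampIdx paragraphs.length b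
        = PySem.List.clampIdx paragraphs.length a
          + (PySem.List.clampIdx paragraphs.length b - PySem.List.clampIdx paragraphs.length a) by omega]
      exact List.take_add
    rw [hsplit, hslice]
    have hslen : ((paragraphs.drop (PySem.List.clampIdx paragraphs.length a)).take
        (PySem.List.clampIdx paragraphs.length b - PySem.List.clampIdx paragraphs.length a)).length
        = PySem.List.clampIdx paragraphs.length b - PySem.List.clampIdx paragraphs.length a := by
      simp only [List.length_take, List.length_drop]
      omega
    rw [hslen]
    simp only [List.map_append, List.sum_append]
    omega
  · have hz : PySem.List.clampIdx paragraphs.length b - PySem.List.clampIdx paragraphs.length a = 0 := by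
      omega
    rw [hslice, hz]
    simp

-- the two folds over the index pairs agree (A's length/breaches = B's total/out)
theorem pv_fold_agree (paragraphs : List String) (pairs : List (Int × Int))
    (text : List String) (length : Int) (breaches : List Int) :
    (pairs.foldl
      (fun (st : List String × Int × List Int) ab =>
        let seg := PySem.Str.join "\n"
          (PySem.List.slice paragraphs (some ab.1) (some ab.2) ++ [""])
        let text := st.1 ++ [seg]
        let length := st.2.1 + PySem.Str.len (PySem.List.pyGetD text (-1) "")
        (text, length, st.2.2 ++ [length]))
      (text, length, breaches)).2
    = (pairs.foldl
      (fun (st : Int × List Int) ab =>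
        let ss := pySliceIndices1 ab.1 ab.2 paragraphs.length
        let total := if ss.1 < ss.2
          then st.1 + (PySem.List.pyGetD
              (paragraphs.foldl (fun acc p => acc ++ [PySem.List.pyGetD acc (-1) 0 + PySem.Str.len p])
                [(0 : Int)]) ss.2 0
            - PySem.List.pyGetD
              (paragraphs.foldl (fun acc p => acc ++ [PySem.List.pyGetD acc (-1) 0 + PySem.Str.len p])
                [(0 : Int)]) ss.1 0 + (ss.2 - ss.1))
          else st.1
        (total, st.2 ++ [total]))
      (length, breaches)) := by
  induction pairs generalizing text length breaches with
  | nil => rfl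
  | cons ab t ih =>
    simp only [List.foldl_cons]
    rw [PySem.List.pyGetD_neg_one_append_singleton]
    rw [pv_seg_len paragraphs ab.1 ab.2]
    split_ifs with h
    · exact ih _ _ _
    · simpa using ih _ _ _

-- A's range loop, rewritten as a loop over the list of consecutive index pairs
theorem pv_range_to_pairs (indices : List Int) (paragraphs : List String) :
    ((PySem.List.pyRange 0 ((indices.length : Int) - 1) 1).foldl
      (fun (st : List String × Int × List Int) i =>
        let seg := PySem.Str.join "\n"
          (PySem.List.slice paragraphs (some (PySem.List.pyGetD indices i 0))
            (some (PySem.List.pyGetD indices (i + 1) 0)) ++ [""])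
        let text := st.1 ++ [seg]
        let length := st.2.1 + PySem.Str.len (PySem.List.pyGetD text (-1) "")
        (text, length, st.2.2 ++ [length]))
      ([], 0, []))
    = ((indices.zip indices.tail).foldl
      (fun (st : List String × Int × List Int) ab =>
        let seg := PySem.Str.join "\n"
          (PySem.List.slice paragraphs (some ab.1) (some ab.2) ++ [""])
        let text := st.1 ++ [seg]
        let length := st.2.1 + PySem.Str.len (PySem.List.pyGetD text (-1) "")
        (text, length, st.2.2 ++ [length]))
      ([], 0, [])) := by
  cases indices with
  | nil =>
    have hr : PySem.List.pyRange 0 (((List.length ([] : List Int) : Int)) - 1) 1 = [] := by decide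
    rw [hr]
    rfl
  | cons x t =>
    set indices := x :: t with hind
    have hlenpairs : (indices.zip indices.tail).length = indices.length - 1 := by
      simp [List.length_zip, hind]
    have hbound : ((indices.length : Int)) - 1 = ((indices.zip indices.tail).length : Int) := by
      rw [hlenpairs]; simp [hind]
    rw [hbound]
    rw [← PySem.List.foldl_pyRange_zero_pyGetD' (indices.zip indices.tail) ((0 : Int), (0 : Int))
      (fun (st : List String × Int × List Int) (ab : Int × Int) =>
        let seg := PySem.Str.join "\n"
          (PySem.List.slice paragraphs (some ab.1) (some ab.2) ++ [""])
        let text := st.1 ++ [seg]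
        let length := st.2.1 + PySem.Str.len (PySem.List.pyGetD text (-1) "")
        (text, length, st.2.2 ++ [length])) ([], 0, [])]
    apply PySem.List.foldl_congr_mem
    intro acc i hi
    rw [PySem.List.mem_pyRange_one] at hi
    obtain ⟨h0, h1⟩ := hi
    have hilt : i.toNat < (indices.zip indices.tail).length := by
      rw [hlenpairs]; omega
    have hilt' : i.toNat < indices.length - 1 := by rw [← hlenpairs]; exact hilt
    have hpair : PySem.List.pyGetD (indices.zip indices.tail) i ((0 : Int), (0 : Int))
        = (indices[i.toNat]'(by omega), indices[i.toNat + 1]'(by omega)) := by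
      rw [PySem.List.pyGetD_eq_getElem _ _ h0 (by omega)]
      rw [List.getElem_zip, List.getElem_tail]
    have ha : PySem.List.pyGetD indices i 0 = indices[i.toNat]'(by omega) := by
      rw [PySem.List.pyGetD_eq_getElem _ _ h0 (by omega)]
    have hb : PySem.List.pyGetD indices (i + 1) 0 = indices[i.toNat + 1]'(by omega) := by
      rw [PySem.List.pyGetD_eq_getElem _ _ (by omega) (by omega)]
      congr 1
      omega
    simp only [hpair, ha, hb]

-- ===== VERDICT =====
theorem get_start_indices_spec : Claim_equal_get_start_indices := by
  intro indices paragraphs _hdom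
  unfold Spec_get_start_indices get_start_indices get_start_indices_alt
  rw [PySem.List.slice_from_one]
  by_cases hnil : indices.length ≠ 0
  · rw [if_pos hnil]
    rw [pv_range_to_pairs indices paragraphs]
    exact congrArg Prod.snd (pv_fold_agree paragraphs (indices.zip indices.tail) [] 0 [])
  · rw [if_neg hnil]
    rw [not_not] at hnil
    rw [List.length_eq_zero_iff] at hnil
    subst hnil
    rfl
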